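-- pv_equiv track=rewrite | github.com/CMU15-112/lecture_demos_qatar | week11/lec1-exam_practice.py | ct2
-- ===== SOURCE A (Python) =====
-- def ct2(n):
--     if n < 10:
--         return (n, n)
--     else:
--         (a, b) = ct2(n // 10)
--         d = n % 10
--         if d > a:
--             a=d
--         elif d < b:
--             b=d
--         return (a, b)
-- ===== SOURCE B (Python) =====
-- def ct2(n):
--     if n < 10:
--         return (n, n)
--     a = b = n % 10
--     n //= 10
--     while n > 0:
--         d = n % 10
--         if d > a:
--             a = d
--         elif d < b:
--             b = d
--         n //= 10
--     return (a, b)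
-- ===== Notes on version B (the rewrite author's own statement) =====
-- stated objective: simpler
-- what changed: Replaces the recursion over the truncated number with an explicit iterative while-loop threading the running max/min through accumulators.
import Mathlib
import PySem

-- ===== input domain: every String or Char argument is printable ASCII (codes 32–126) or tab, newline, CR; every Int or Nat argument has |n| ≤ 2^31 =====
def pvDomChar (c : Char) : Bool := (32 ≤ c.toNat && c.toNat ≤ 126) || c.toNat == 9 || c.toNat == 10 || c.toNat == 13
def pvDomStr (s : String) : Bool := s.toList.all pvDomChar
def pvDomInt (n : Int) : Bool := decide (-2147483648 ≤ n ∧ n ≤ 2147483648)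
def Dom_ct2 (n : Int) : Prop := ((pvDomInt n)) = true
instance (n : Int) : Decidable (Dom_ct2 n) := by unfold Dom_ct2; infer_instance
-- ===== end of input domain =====

-- B replaces A's recursion with an explicit iterative loop (same guard, same update rule); objective: simpler.

-- ===== PORT A =====
def ct2 (n : Int) : Int × Int :=
  if n < 10 then (n, n)
  else
    let p := ct2 (PySem.Int.floordiv n 10)
    let a := p.1
    let b := p.2
    let d := PySem.Int.mod n 10
    if d > a then (d, b)
    else if d < b then (a, d)
    else (a, b)
termination_by n.toNat
decreasing_by
  rw [PySem.Int.floordiv_eq_ediv_of_pos (by norm_num)]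
  omega

-- ===== PORT B =====
-- the 'while n > 0:' loop of Source B, state (m, a, b)
def ct2Loop (m a b : Int) : Int × Int :=
  if m ≤ 0 then (a, b)
  else
    let d := PySem.Int.mod m 10
    let a' := if d > a then d else a
    let b' := if d > a then b else if d < b then d else b
    ct2Loop (PySem.Int.floordiv m 10) a' b'
termination_by m.toNat
decreasing_by
  rw [PySem.Int.floordiv_eq_ediv_of_pos (by norm_num)]
  omega

def ct2_alt (n : Int) : Int × Int :=
  if n < 10 then (n, n)
  else
    let d := PySem.Int.mod n 10
    ct2Loop (PySem.Int.floordiv n 10) d d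

-- ===== PRECONDITION & SPEC =====
def Spec_ct2 (n : Int) (out : Int × Int) : Prop := out = ct2_alt n
instance (n : Int) (out : Int × Int) : Decidable (Spec_ct2 n out) := by unfold Spec_ct2; infer_instance

-- ===== CLAIM (what is proved, stated in full; the proofs are below) =====
def Claim_equal_ct2 : Prop := ∀ (n : Int), Dom_ct2 n → Spec_ct2 n (ct2 n)

-- ===== LEMMAS AND PROOFS =====

theorem ct2_lt10 (n : Int) (h : n < 10) : ct2 n = (n, n) := by
  rw [ct2]; simp [h]

theorem ct2_ge10 (n : Int) (h : ¬ n < 10) :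
    ct2 n =
      (if PySem.Int.mod n 10 > (ct2 (PySem.Int.floordiv n 10)).1 then
        (PySem.Int.mod n 10, (ct2 (PySem.Int.floordiv n 10)).2)
      else if PySem.Int.mod n 10 < (ct2 (PySem.Int.floordiv n 10)).2 then
        ((ct2 (PySem.Int.floordiv n 10)).1, PySem.Int.mod n 10)
      else ct2 (PySem.Int.floordiv n 10)) := by
  rw [ct2]; simp [h]

-- for n ≥ 1 the result components are digits with snd ≤ fst
theorem ct2_bounds (n : Int) (h1 : 1 ≤ n) :
    0 ≤ (ct2 n).2 ∧ (ct2 n).2 ≤ (ct2 n).1 ∧ (ct2 n).1 ≤ 9 := by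
  by_cases h : n < 10
  · rw [ct2_lt10 n h]; omega
  · have hd10 : PySem.Int.floordiv n 10 = n / 10 :=
      PySem.Int.floordiv_eq_ediv_of_pos (by norm_num)
    have hm10 : PySem.Int.mod n 10 = n % 10 :=
      PySem.Int.mod_eq_emod_of_pos (by norm_num)
    have hrec := ct2_bounds (n / 10) (by omega)
    rw [ct2_ge10 n h, hd10, hm10]
    have hmod : 0 ≤ n % 10 ∧ n % 10 ≤ 9 := by omega
    split_ifs <;> simp_all <;> omega
termination_by n.toNat
decreasing_by
  omega

theorem ct2Loop_spec (k : Nat) (m a b : Int) (hm : 1 ≤ m) (hk : m.toNat ≤ k)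
    (hab : b ≤ a) :
    ct2Loop m a b = (max a (ct2 m).1, min b (ct2 m).2) := by
  induction k generalizing m a b with
  | zero => omega
  | succ k ih =>
    have hd10 : PySem.Int.floordiv m 10 = m / 10 :=
      PySem.Int.floordiv_eq_ediv_of_pos (by norm_num)
    have hm10 : PySem.Int.mod m 10 = m % 10 :=
      PySem.Int.mod_eq_emod_of_pos (by norm_num)
    rw [ct2Loop]
    by_cases h : m < 10
    · -- one more iteration on a single digit, then the recursive call stops
      have hml : m % 10 = m := by omega
      have h0 : ¬ m ≤ 0 := by omega
      simp only [h0, if_false, hd10, hm10, hml]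
      have hstop : m / 10 = 0 := by omega
      rw [hstop, ct2Loop, ct2_lt10 m h]
      simp only [le_refl, if_true]
      split_ifs <;> simp <;> omega
    · have h0 : ¬ m ≤ 0 := by omega
      simp only [h0, if_false, hd10, hm10]
      have hrecb := ct2_bounds (m / 10) (by omega)
      have hmod : 0 ≤ m % 10 ∧ m % 10 ≤ 9 := by omega
      have ihr : ∀ a' b', b' ≤ a' →
          ct2Loop (m / 10) a' b' = (max a' (ct2 (m / 10)).1, min b' (ct2 (m / 10)).2) :=
        fun a' b' hab' => ih (m / 10) a' b' (by omega) (by omega) hab'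
      rw [ct2_ge10 m h, hd10, hm10]
      set d := m % 10 with hdd
      set A := (ct2 (m / 10)).1 with hA
      set B := (ct2 (m / 10)).2 with hB
      by_cases h1 : d > a
      · rw [if_pos h1, if_pos h1, ihr d b (by omega)]
        split_ifs <;> simp [Prod.ext_iff] <;> omega
      · rw [if_neg h1, if_neg h1]
        by_cases h2 : d < b
        · rw [if_pos h2, ihr a d (by omega)]
          split_ifs <;> simp [Prod.ext_iff] <;> omega
        · rw [if_neg h2, ihr a b hab]
          split_ifs <;> simp [Prod.ext_iff] <;> omega

-- ===== VERDICT (by name: the statement is the Claim_ definition above) =====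
theorem ct2_spec : Claim_equal_ct2 := by
  intro n _
  unfold Spec_ct2 ct2_alt
  by_cases h : n < 10
  · rw [ct2_lt10 n h]; simp [h]
  · simp only [h, if_false]
    have hd10 : PySem.Int.floordiv n 10 = n / 10 :=
      PySem.Int.floordiv_eq_ediv_of_pos (by norm_num)
    have hm10 : PySem.Int.mod n 10 = n % 10 :=
      PySem.Int.mod_eq_emod_of_pos (by norm_num)
    rw [hd10, hm10, ct2Loop_spec (n / 10).toNat (n / 10) (n % 10) (n % 10)
        (by omega) (by omega) le_rfl]
    have hrecb := ct2_bounds (n / 10) (by omega)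
    have hmod : 0 ≤ n % 10 ∧ n % 10 ≤ 9 := by omega
    rw [ct2_ge10 n h, hd10, hm10]
    split_ifs <;> simp [Prod.ext_iff] <;> omega
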